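-- pv_equiv track=rewrite | github.com/afzalsiddique/problem-solving | Problem_Solving_Python/leetcode/leetcode395.py | find_the_indices_of_the_problematic_letters
-- ===== SOURCE A (Python) =====
-- def find_the_indices_of_the_problematic_letters(s, k, di):
--     indices = []
--     problematic_letters = []
--     for letter in di:
--         if di[letter] < k:
--             problematic_letters.append(letter)
--     for idx in range(len(s)):
--         if s[idx] in problematic_letters:
--             indices.append(idx)
--     return indices
-- ===== SOURCE B (Python) =====
-- def find_the_indices_of_the_problematic_letters(s, k, di):
--     # Inverted index: group the indices of s by character, then gather the
--     # index lists of the letters whose count is below k and sort them.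
--     positions = {}
--     for i, c in enumerate(s):
--         positions.setdefault(c, []).append(i)
--     out = []
--     for letter, cnt in di.items():
--         if cnt < k:
--             out.extend(positions.get(letter, []))
--     out.sort()
--     return out
-- ===== Notes on version B (the rewrite author's own statement) =====
-- stated objective: faster
-- what changed: Inverts the decomposition: instead of precomputing the problematic-letter list and scanning s with a per-character list-membership test, B builds an inverted index mapping each character of s to its list of indices in one pass, then gathers the index lists of the letters whose count is below k and sorts the result.
import Mathlib
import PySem

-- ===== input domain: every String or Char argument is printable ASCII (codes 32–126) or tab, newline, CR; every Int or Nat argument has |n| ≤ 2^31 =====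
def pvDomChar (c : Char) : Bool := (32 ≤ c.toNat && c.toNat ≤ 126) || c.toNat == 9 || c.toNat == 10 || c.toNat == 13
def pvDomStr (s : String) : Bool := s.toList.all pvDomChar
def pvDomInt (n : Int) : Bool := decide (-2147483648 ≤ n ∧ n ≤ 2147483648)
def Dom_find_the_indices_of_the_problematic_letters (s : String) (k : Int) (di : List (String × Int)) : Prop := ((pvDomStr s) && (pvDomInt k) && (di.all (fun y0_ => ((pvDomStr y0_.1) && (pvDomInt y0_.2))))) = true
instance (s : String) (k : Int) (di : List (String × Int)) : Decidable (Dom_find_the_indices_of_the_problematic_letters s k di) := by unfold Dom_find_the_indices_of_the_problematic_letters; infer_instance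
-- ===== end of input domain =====

-- B replaces A's two staged passes (precompute problematic letters, then scan s testing
-- membership) by the opposite decomposition: build an inverted index (character -> list of its
-- indices) in one pass over s, gather the index lists of the below-k letters, and sort;
-- objective: faster (removes the per-character scan of the letter list).

-- ===== PORT A =====
def find_the_indices_of_the_problematic_letters (s : String) (k : Int) (di : List (String × Int)) : List Int :=
  let d : PySem.Dict String Int := PySem.Dict.mk di
  let problematic_letters : List String :=
    d.keys.foldl (fun acc letter =>
      if (d.get? letter).any (fun v => v < k) then acc ++ [letter] else acc) []
  (PySem.List.pyRange 0 (PySem.Str.len s)).foldl (fun acc idx =>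
    if (PySem.Str.pyGet? s idx).any (fun c => problematic_letters.contains (String.ofList [c]))
    then acc ++ [idx] else acc) []

-- ===== PORT B =====
def find_the_indices_of_the_problematic_letters_alt (s : String) (k : Int) (di : List (String × Int)) : List Int :=
  let positions : PySem.Dict String (List Int) :=
    (PySem.List.enumerate s.toList).foldl
      (fun d p => d.modify (String.ofList [p.2]) [] (· ++ [p.1])) PySem.Dict.empty
  let out : List Int :=
    (PySem.Dict.mk di).items.foldl
      (fun acc p => if p.2 < k then acc ++ positions.getD p.1 [] else acc) []
  PySem.List.sorted out (fun x => x) false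

-- ===== PRECONDITION & SPEC =====
-- Pre_ excludes association lists with duplicate keys: they do not represent any Python dict
-- (a dict's keys are unique), so neither port's reading of them is the Python behaviour.
def Pre_find_the_indices_of_the_problematic_letters (s : String) (k : Int) (di : List (String × Int)) : Prop :=
  (di.map Prod.fst).Nodup
instance (s : String) (k : Int) (di : List (String × Int)) : Decidable (Pre_find_the_indices_of_the_problematic_letters s k di) := by unfold Pre_find_the_indices_of_the_problematic_letters; infer_instance

def pvWitness_find_the_indices_of_the_problematic_letters : String × Int × (List (String × Int)) :=
  ("abca", 1, [("a", 0), ("b", 2)])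

def Spec_find_the_indices_of_the_problematic_letters (s : String) (k : Int) (di : List (String × Int)) (out : List Int) : Prop := out = find_the_indices_of_the_problematic_letters_alt s k di
instance (s : String) (k : Int) (di : List (String × Int)) (out : List Int) : Decidable (Spec_find_the_indices_of_the_problematic_letters s k di out) := by unfold Spec_find_the_indices_of_the_problematic_letters; infer_instance

-- ===== CLAIM (what is proved, stated in full; the proofs are below) =====
def Claim_equal_find_the_indices_of_the_problematic_letters : Prop := ∀ (s : String) (k : Int) (di : List (String × Int)), Dom_find_the_indices_of_the_problematic_letters s k di → Pre_find_the_indices_of_the_problematic_letters s k di → Spec_find_the_indices_of_the_problematic_letters s k di (find_the_indices_of_the_problematic_letters s k di)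

-- ===== LEMMAS AND PROOFS =====

-- A's membership test against the filtered key list is exactly the direct dict test.
theorem pv_mem_problematic {k : Int} (d : PySem.Dict String Int) (x : String) :
    (List.filter (fun letter => (d.get? letter).any (fun v => v < k)) d.keys).contains x
      = (d.get? x).any (fun v => v < k) := by
  have hmem : x ∈ d.keys ↔ (d.get? x).isSome := by
    rw [← PySem.Dict.contains_iff_mem_keys, PySem.Dict.contains_eq_isSome_get?]
  cases hx : d.get? x with
  | none =>
      simp only [Option.any_none]
      simp only [List.contains_eq_mem, decide_eq_false_iff_not, List.mem_filter]
      rintro ⟨hk, hp⟩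
      simp [hx] at hp
  | some v =>
      simp only [Option.any_some]
      simp only [List.contains_eq_mem, List.mem_filter, hmem, hx]
      by_cases hv : v < k <;> simp [hv]

-- A in filtered-enumerate form.
theorem pv_A_eq (s : String) (k : Int) (di : List (String × Int)) :
    find_the_indices_of_the_problematic_letters s k di
      = ((PySem.List.enumerate s.toList).filter (fun p =>
          ((PySem.Dict.mk di).get? (String.ofList [p.2])).any (fun v => v < k))).map (·.1) := by
  unfold find_the_indices_of_the_problematic_letters
  simp only [PySem.List.foldl_append_if_eq_filter, List.nil_append,
    PySem.List.enumerate_eq_map_pyRange (d := ' '), List.filter_map, List.map_map,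
    Function.comp_def, PySem.Str.len_eq, PySem.List.len_eq]
  rw [List.map_id']
  apply List.filter_congr
  intro j hj
  rw [PySem.List.mem_pyRange_one] at hj
  obtain ⟨h0, hn⟩ := hj
  obtain ⟨m, rfl⟩ : ∃ m : Nat, (m : Int) = j := ⟨j.toNat, Int.toNat_of_nonneg h0⟩
  have hm : m < s.toList.length := by exact_mod_cast hn
  rw [PySem.Str.pyGet?_natCast, PySem.List.pyGetD_of_nonneg _ _ (by positivity),
    Int.toNat_natCast, List.getD_eq_getElem?_getD, List.getElem?_eq_getElem hm]
  simp only [Option.any_some, Option.getD_some]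
  exact pv_mem_problematic _ _

-- B in filtered-items/flatMap form.
theorem pv_B_eq (s : String) (k : Int) (di : List (String × Int)) :
    find_the_indices_of_the_problematic_letters_alt s k di
      = PySem.List.sorted
          (((PySem.Dict.mk di).items.filter (fun p => decide (p.2 < k))).flatMap (fun p =>
            ((((PySem.List.enumerate s.toList).map (fun q => (String.ofList [q.2], q.1))).filter
                (fun q => q.1 == p.1)).map (·.2))))
          (fun x => x) false := by
  unfold find_the_indices_of_the_problematic_letters_alt
  dsimp only
  have hpos : (PySem.List.enumerate s.toList).foldl
      (fun d p => d.modify (String.ofList [p.2]) [] (· ++ [p.1])) PySem.Dict.empty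
    = ((PySem.List.enumerate s.toList).map (fun q => (String.ofList [q.2], q.1))).foldl
      (fun d q => d.modify q.1 [] (· ++ [q.2])) PySem.Dict.empty := by
    rw [List.foldl_map]
  rw [hpos]
  congr 1
  rw [PySem.List.foldl_ite_eq_foldl_filter, PySem.List.foldl_append_eq_flatMap, List.nil_append]
  apply List.flatMap_congr
  intro p _
  rw [PySem.Dict.getD_foldl_modify_append, PySem.Dict.getD_empty, List.nil_append]

-- Membership in one inverted-index group, characterised by the input.
theorem pv_mem_group (s : String) (c : String) (i : Int) :
    (i ∈ ((((PySem.List.enumerate s.toList).map (fun q => (String.ofList [q.2], q.1))).filter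
        (fun q => q.1 == c)).map (·.2)))
      ↔ ∃ (m : Nat) (h : m < s.toList.length),
          i = (m : Int) ∧ c = String.ofList [s.toList[m]] := by
  simp only [List.mem_map, List.mem_filter, PySem.List.mem_enumerate_iff, beq_iff_eq]
  constructor
  · rintro ⟨q, ⟨⟨p, ⟨m, h, rfl⟩, rfl⟩, hc⟩, rfl⟩
    exact ⟨m, h, by simpa using rfl, hc.symm⟩
  · rintro ⟨m, h, rfl, rfl⟩
    exact ⟨(String.ofList [s.toList[m]], (m : Int)),
      ⟨⟨((m : Int), s.toList[m]), ⟨m, h, by simp⟩, rfl⟩, rfl⟩, rfl⟩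

theorem pv_main (s : String) (k : Int) (di : List (String × Int))
    (hnd : (di.map Prod.fst).Nodup) :
    find_the_indices_of_the_problematic_letters s k di
      = find_the_indices_of_the_problematic_letters_alt s k di := by
  rw [pv_A_eq, pv_B_eq]
  have hkeys : (PySem.Dict.mk di).keys.Nodup := by
    simpa [PySem.Dict.keys] using hnd
  have hitems : (PySem.Dict.mk di).items = di := rfl
  -- the result of A's scan is strictly increasing
  have hpair : (((PySem.List.enumerate s.toList).filter (fun p =>
      ((PySem.Dict.mk di).get? (String.ofList [p.2])).any (fun v => v < k))).map (·.1)).Pairwise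
        (fun a b => a < b) := by
    rw [List.pairwise_map]
    exact List.Pairwise.sublist List.filter_sublist (PySem.List.pairwise_lt_enumerate s.toList 0)
  have hFnodup : (((PySem.List.enumerate s.toList).filter (fun p =>
      ((PySem.Dict.mk di).get? (String.ofList [p.2])).any (fun v => v < k))).map (·.1)).Nodup :=
    hpair.imp (fun h => ne_of_lt h)
  -- every inverted-index group is a sublist of the index range, hence Nodup
  have hgroup_nodup : ∀ c : String,
      (((((PySem.List.enumerate s.toList).map (fun q => (String.ofList [q.2], q.1))).filter
        (fun q => q.1 == c)).map (·.2))).Nodup := by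
    intro c
    have hsub : ((((PySem.List.enumerate s.toList).map (fun q => (String.ofList [q.2], q.1))).filter
        (fun q => q.1 == c)).map (·.2)).Sublist
        (((PySem.List.enumerate s.toList).map (fun q => (String.ofList [q.2], q.1))).map (·.2)) :=
      List.filter_sublist.map _
    apply hsub.nodup
    rw [List.map_map]
    have : ((PySem.List.enumerate s.toList).map ((·.2) ∘ (fun q => (String.ofList [q.2], q.1))))
        = (PySem.List.enumerate s.toList).map (·.1) := by
      simp [Function.comp_def]
    rw [this, PySem.List.map_fst_enumerate]
    exact PySem.List.nodup_pyRange_one _ _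
  -- the gathered output is Nodup: groups are Nodup and pairwise disjoint (distinct keys)
  have houtnodup : ((((PySem.Dict.mk di).items.filter (fun p => decide (p.2 < k))).flatMap (fun p =>
      ((((PySem.List.enumerate s.toList).map (fun q => (String.ofList [q.2], q.1))).filter
          (fun q => q.1 == p.1)).map (·.2))))).Nodup := by
    rw [List.nodup_flatMap]
    refine ⟨fun p _ => hgroup_nodup p.1, ?_⟩
    have hne : ((PySem.Dict.mk di).items.filter (fun p => decide (p.2 < k))).Pairwise
        (fun p q => p.1 ≠ q.1) := by
      apply List.Pairwise.sublist List.filter_sublist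
      rw [hitems]
      have := hnd
      rw [List.nodup_iff_pairwise_ne, List.pairwise_map] at this
      exact this
    refine hne.imp ?_
    intro p q hpq
    intro i hi hj
    rw [pv_mem_group] at hi hj
    obtain ⟨m, hm, him, hcm⟩ := hi
    obtain ⟨m', hm', him', hcm'⟩ := hj
    have hmm : m = m' := by
      have h2 := him.symm.trans him'
      exact_mod_cast h2
    subst hmm
    exact hpq (hcm.trans hcm'.symm)
  refine (PySem.List.sorted_eq_of_perm_of_pairwise_lt _ _ (fun x => x) ?_ hpair).symm
  rw [List.perm_ext_iff_of_nodup hFnodup houtnodup]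
  intro a
  constructor
  · intro ha
    rw [List.mem_map] at ha
    obtain ⟨p, hpmem, rfl⟩ := ha
    rw [List.mem_filter] at hpmem
    obtain ⟨hpE, hQ⟩ := hpmem
    rw [PySem.List.mem_enumerate_iff] at hpE
    obtain ⟨m, hm, rfl⟩ := hpE
    rw [Option.any_eq_true] at hQ
    obtain ⟨v, hv, hvk⟩ := hQ
    rw [List.mem_flatMap]
    refine ⟨(String.ofList [s.toList[m]], v), ?_, ?_⟩
    · rw [List.mem_filter]
      exact ⟨PySem.Dict.mem_items_of_get?_eq_some _ hv, by simp [hvk]⟩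
    · rw [pv_mem_group]
      exact ⟨m, hm, by simp, rfl⟩
  · intro ha
    rw [List.mem_flatMap] at ha
    obtain ⟨p, hpmem, hmem⟩ := ha
    rw [List.mem_filter] at hpmem
    obtain ⟨hp, hpk⟩ := hpmem
    rw [pv_mem_group] at hmem
    obtain ⟨m, hm, rfl, hc⟩ := hmem
    rw [List.mem_map]
    refine ⟨(0 + (m : Int), s.toList[m]), ?_, by simp⟩
    rw [List.mem_filter]
    refine ⟨?_, ?_⟩
    · rw [PySem.List.mem_enumerate_iff]
      exact ⟨m, hm, rfl⟩
    · have hget : (PySem.Dict.mk di).get? p.1 = some p.2 :=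
        PySem.Dict.get?_of_mem_items _ hp hkeys
      dsimp only
      rw [← hc, hget]
      simpa using hpk

-- ===== VERDICT (by name: the statement is the Claim_ definition above) =====
theorem find_the_indices_of_the_problematic_letters_spec : Claim_equal_find_the_indices_of_the_problematic_letters := by
  intro s k di _ hpre
  exact pv_main s k di hpre
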